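-- pv_equiv track=rewrite | github.com/john-erinjery/read-lightnovels-scraper | extractor.py | split_at_words_
-- ===== SOURCE A (Python) =====
-- def split_at_words_(line, num):
--     splitted_line = line.split()
--     line_list = []
--     temp_line = ''
--     count = 0
--     if len(line) <= num:
--         return [line]
--     ns = 0
--     ne = 0
--     indexes = []
--     for i in splitted_line:
--         count += len(i) + 1
--         ne += 1
--         if count >= num:
--             indexes.append([ns, ne])
--             ns = ne
--             count = len(i)
--         else:
--             pass
--     for i in indexes:
--         for j in splitted_line[i[0]:i[1]]:
--             temp_line += j + ' '
--         line_list.append(temp_line)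
--         temp_line = ''
--     for i in splitted_line[ns:]:
--         temp_line += i + ' '
--     line_list.append(temp_line)
--     return line_list
-- ===== SOURCE B (Python) =====
-- def split_at_words_(line, num):
--     if len(line) <= num:
--         return [line]
--     chunks = []
--     buf = []
--     count = 0
--     for word in line.split():
--         count += len(word) + 1
--         buf.append(word)
--         if count >= num:
--             chunks.append(_chunk(buf))
--             buf = []
--             count = len(word)
--     chunks.append(_chunk(buf))
--     return chunks
--
--
-- def _chunk(buf):
--     return ''.join(w + ' ' for w in buf)
-- ===== Notes on version B (the rewrite author's own statement) =====
-- stated objective: simpler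
-- what changed: B replaces A's two-phase scheme (build an index-range table, then reconstruct each chunk by slicing the word list in a second nested loop) with a single pass over the words that maintains a current-chunk buffer and flushes it into the result at each boundary.
import Mathlib
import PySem

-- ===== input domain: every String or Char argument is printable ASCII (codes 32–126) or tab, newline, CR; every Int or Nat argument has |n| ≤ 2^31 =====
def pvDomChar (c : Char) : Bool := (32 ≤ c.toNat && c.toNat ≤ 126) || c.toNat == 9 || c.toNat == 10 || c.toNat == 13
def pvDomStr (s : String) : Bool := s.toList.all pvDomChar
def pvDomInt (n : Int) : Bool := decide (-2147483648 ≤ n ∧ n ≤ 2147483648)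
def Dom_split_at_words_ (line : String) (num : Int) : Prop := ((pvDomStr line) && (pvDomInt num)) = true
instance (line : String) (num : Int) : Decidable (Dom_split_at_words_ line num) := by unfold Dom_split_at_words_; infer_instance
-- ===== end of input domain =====

-- B: one-pass buffer-and-flush chunking instead of A's index-table + slice-reconstruction (simpler decomposition, same cost).

-- ===== PORT A =====
-- 'temp_line += j + " "'
def pvCat (t : String) (j : String) : String := t ++ j ++ " "

-- state (count, ns, ne, indexes) of A's first loop
def pvStepA (num : Int) (st : Int × Nat × Nat × List (Nat × Nat)) (i : String) :
    Int × Nat × Nat × List (Nat × Nat) :=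
  let count := st.1 + PySem.Str.len i + 1
  let ne := st.2.2.1 + 1
  if num ≤ count then (PySem.Str.len i, ne, ne, st.2.2.2 ++ [(st.2.1, ne)])
  else (count, st.2.1, ne, st.2.2.2)

-- state (line_list, temp_line) of A's reconstruction loop over indexes
def pvStepA2 (ws : List String) (acc : List String × String) (i : Nat × Nat) :
    List String × String :=
  (acc.1 ++ [(PySem.List.slice ws (some (i.1 : Int)) (some (i.2 : Int))).foldl pvCat acc.2], "")

def split_at_words_ (line : String) (num : Int) : List String :=
  let splitted_line := PySem.Str.split₀ line
  if PySem.Str.len line ≤ num then [line]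
  else
    let st := splitted_line.foldl (pvStepA num) (0, 0, 0, [])
    let p := st.2.2.2.foldl (pvStepA2 splitted_line) ([], "")
    let temp_line := (PySem.List.slice splitted_line (some (st.2.1 : Int)) none).foldl pvCat p.2
    p.1 ++ [temp_line]

-- ===== PORT B =====
-- ''.join(w + ' ' for w in buf)
def pvChunk (buf : List String) : String := PySem.Str.join "" (buf.map (fun w => w ++ " "))

-- state (chunks, buf, count) of B's single loop
def pvStepB (num : Int) (st : List String × List String × Int) (word : String) :
    List String × List String × Int :=
  let count := st.2.2 + PySem.Str.len word + 1
  let buf := st.2.1 ++ [word]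
  if num ≤ count then (st.1 ++ [pvChunk buf], [], PySem.Str.len word)
  else (st.1, buf, count)

def split_at_words__alt (line : String) (num : Int) : List String :=
  if PySem.Str.len line ≤ num then [line]
  else
    let st := (PySem.Str.split₀ line).foldl (pvStepB num) ([], [], 0)
    st.1 ++ [pvChunk st.2.1]

-- ===== PRECONDITION & SPEC =====
def Spec_split_at_words_ (line : String) (num : Int) (out : List String) : Prop := out = split_at_words__alt line num
instance (line : String) (num : Int) (out : List String) : Decidable (Spec_split_at_words_ line num out) := by unfold Spec_split_at_words_; infer_instance

-- ===== CLAIM (what is proved, stated in full; the proofs are below) =====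
def Claim_equal_split_at_words_ : Prop := ∀ (line : String) (num : Int), Dom_split_at_words_ line num → Spec_split_at_words_ line num (split_at_words_ line num)

-- ===== LEMMAS AND PROOFS =====
theorem pvChunk_nil : pvChunk [] = "" := by
  simp [pvChunk, PySem.Str.join, PySem.Chars.join, List.intercalate]

theorem pvChunk_cons (x : String) (xs : List String) :
    pvChunk (x :: xs) = (x ++ " ") ++ pvChunk xs := by
  rw [← String.toList_inj]
  simp only [pvChunk, PySem.Str.join, PySem.Chars.join, List.intercalate, List.map_cons]
  cases xs <;> simp

theorem foldl_pvCat (xs : List String) (t0 : String) :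
    xs.foldl pvCat t0 = t0 ++ pvChunk xs := by
  induction xs generalizing t0 with
  | nil => simp [pvChunk_nil]
  | cons x xs ih =>
      simp only [List.foldl_cons, ih, pvCat, pvChunk_cons, String.append_assoc]

theorem foldl_pvStepA2 (ws : List String) (idxs : List (Nat × Nat)) (acc : List String) :
    idxs.foldl (pvStepA2 ws) (acc, "") =
      (acc ++ idxs.map
        (fun p => pvChunk (PySem.List.slice ws (some (p.1 : Int)) (some (p.2 : Int)))), "") := by
  induction idxs generalizing acc with
  | nil => simp
  | cons p idxs ih =>
      simp only [List.foldl_cons, pvStepA2, foldl_pvCat, String.empty_append, ih,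
        List.map_cons, List.append_assoc, List.singleton_append]

theorem pv_slice_prefix (done rest : List String) (w : String) (ns : Nat) (h : ns ≤ done.length) :
    PySem.List.slice (done ++ w :: rest) (some (ns : Int)) (some ((done.length + 1 : Nat) : Int))
      = done.drop ns ++ [w] := by
  rw [PySem.List.slice_natCast]
  rw [List.drop_append_of_le_length h]
  have hlen : done.length + 1 - ns = (done.drop ns).length + 1 := by
    simp only [List.length_drop]; omega
  rw [hlen, List.take_append]
  simp

theorem pv_fold_rel (num : Int) (rest : List String) :
    ∀ (done : List String) (c : Int) (ns : Nat) (idxs : List (Nat × Nat)) (res : List String),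
      ns ≤ done.length →
      res = idxs.map (fun p => pvChunk (PySem.List.slice (done ++ rest) (some (p.1 : Int)) (some (p.2 : Int)))) →
      (let stA := rest.foldl (pvStepA num) (c, ns, done.length, idxs)
       let stB := rest.foldl (pvStepB num) (res, done.drop ns, c)
       stA.2.2.2.map
           (fun p => pvChunk (PySem.List.slice (done ++ rest) (some (p.1 : Int)) (some (p.2 : Int))))
         ++ [pvChunk ((done ++ rest).drop stA.2.1)]
       = stB.1 ++ [pvChunk stB.2.1]) := by
  induction rest with
  | nil =>
      intro done c ns idxs res hns hres
      simp only [List.foldl_nil, List.append_nil] at *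
      rw [hres]
  | cons w rest ih =>
      intro done c ns idxs res hns hres
      simp only [List.foldl_cons]
      by_cases hcnt : num ≤ c + PySem.Str.len w + 1
      · have hstepA : pvStepA num (c, ns, done.length, idxs) w
            = (PySem.Str.len w, done.length + 1, done.length + 1, idxs ++ [(ns, done.length + 1)]) := by
          simp only [pvStepA, if_pos hcnt]
        have hstepB : pvStepB num (res, done.drop ns, c) w
            = (res ++ [pvChunk (done.drop ns ++ [w])], [], PySem.Str.len w) := by
          simp only [pvStepB, if_pos hcnt]
        rw [hstepA, hstepB]
        have hres2 : res ++ [pvChunk (done.drop ns ++ [w])]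
            = (idxs ++ [(ns, done.length + 1)]).map
                (fun p => pvChunk (PySem.List.slice ((done ++ [w]) ++ rest) (some (p.1 : Int)) (some (p.2 : Int)))) := by
          simp only [List.map_append, List.map_cons, List.map_nil]
          rw [List.append_assoc, List.singleton_append]
          rw [← hres, pv_slice_prefix done rest w ns hns]
        have h := ih (done ++ [w]) (PySem.Str.len w) (done.length + 1)
          (idxs ++ [(ns, done.length + 1)]) (res ++ [pvChunk (done.drop ns ++ [w])])
          (by simp) hres2
        simp only [show ((done ++ [w]).length = done.length + 1) from by simp,
          show ((done ++ [w]).drop (done.length + 1) = []) from by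
            rw [List.drop_eq_nil_iff]; simp,
          show ((done ++ [w]) ++ rest = done ++ w :: rest) from by simp] at h
        exact h
      · have hstepA : pvStepA num (c, ns, done.length, idxs) w
            = (c + PySem.Str.len w + 1, ns, done.length + 1, idxs) := by
          simp only [pvStepA, if_neg hcnt]
        have hstepB : pvStepB num (res, done.drop ns, c) w
            = (res, done.drop ns ++ [w], c + PySem.Str.len w + 1) := by
          simp only [pvStepB, if_neg hcnt]
        rw [hstepA, hstepB]
        have hres2 : res = idxs.map
            (fun p => pvChunk (PySem.List.slice ((done ++ [w]) ++ rest) (some (p.1 : Int)) (some (p.2 : Int)))) := by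
          rw [List.append_assoc, List.singleton_append]; exact hres
        have h := ih (done ++ [w]) (c + PySem.Str.len w + 1) ns idxs res
          (by simp; omega) hres2
        simp only [show ((done ++ [w]).length = done.length + 1) from by simp,
          show ((done ++ [w]).drop ns = done.drop ns ++ [w]) from List.drop_append_of_le_length hns,
          show ((done ++ [w]) ++ rest = done ++ w :: rest) from by simp] at h
        exact h

-- ===== VERDICT (by name: the statement is the Claim_ definition above) =====
theorem split_at_words__spec : Claim_equal_split_at_words_ := by
  intro line num _
  show split_at_words_ line num = split_at_words__alt line num
  unfold split_at_words_ split_at_words__alt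
  by_cases hg : PySem.Str.len line ≤ num
  · rw [if_pos hg, if_pos hg]
  · rw [if_neg hg, if_neg hg]
    have h := pv_fold_rel num (PySem.Str.split₀ line) [] 0 0 [] [] (by simp) (by simp)
    simp only [List.nil_append, List.drop_zero, List.length_nil] at h
    simp only [foldl_pvStepA2, PySem.List.slice_from_natCast, foldl_pvCat, String.empty_append]
    simpa using h
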